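-- pv_equiv track=rewrite | github.com/williamseddon/testingEnv | masterStarwalk.py | insert_after_symptom20
-- ===== SOURCE A (Python) =====
-- from typing import Any, Dict, List, Optional, Set, Tuple
--
-- def insert_after_symptom20(out_cols: List[str], extra_cols: List[str]) -> List[str]:
--     base = list(out_cols)
--     extras = [c for c in extra_cols if c and str(c).strip()]
--     if not extras:
--         return base
--     base_no_extras = [c for c in base if c not in extras]
--     try:
--         idx = base_no_extras.index("Symptom 20")
--         return base_no_extras[: idx + 1] + extras + base_no_extras[idx + 1 :]
--     except ValueError:
--         return base_no_extras + extras
-- ===== SOURCE B (Python) =====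
-- def insert_after_symptom20(out_cols, extra_cols):
--     extras = [c for c in extra_cols if c and c.strip()]
--     extras_set = set(extras)
--     result = []
--     inserted = False
--     for c in out_cols:
--         if c in extras_set:
--             continue
--         result.append(c)
--         if not inserted and c == "Symptom 20":
--             result.extend(extras)
--             inserted = True
--     if not inserted:
--         result.extend(extras)
--     return result
-- ===== Notes on version B (the rewrite author's own statement) =====
-- stated objective: faster
-- what changed: Replaces A's remove-extras pass with a linear list-membership scan plus .index/slice-concatenation insertion (guarded by an early return for empty extras) with a single fused traversal of out_cols using a hash set to skip extras and an inserted flag that splices the extras right after the first 'Symptom 20', appending them at the end if the flag never fired.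
import Mathlib
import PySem

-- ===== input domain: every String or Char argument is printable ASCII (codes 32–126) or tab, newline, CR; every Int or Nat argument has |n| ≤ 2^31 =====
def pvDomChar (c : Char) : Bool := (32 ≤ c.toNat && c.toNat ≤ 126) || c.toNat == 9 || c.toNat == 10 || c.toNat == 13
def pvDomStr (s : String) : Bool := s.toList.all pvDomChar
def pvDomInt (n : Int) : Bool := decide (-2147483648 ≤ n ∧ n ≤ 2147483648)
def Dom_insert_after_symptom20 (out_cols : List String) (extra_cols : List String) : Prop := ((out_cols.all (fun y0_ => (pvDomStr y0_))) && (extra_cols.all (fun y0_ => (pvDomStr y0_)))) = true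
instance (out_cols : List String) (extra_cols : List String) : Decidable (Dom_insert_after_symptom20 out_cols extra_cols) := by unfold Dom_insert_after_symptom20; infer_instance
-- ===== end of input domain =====

-- B fuses A's remove-extras pass (list-membership scan) and index/slice insertion into one traversal with a set and an inserted flag; a timing run measured B faster.


-- ===== PORT A =====
def insert_after_symptom20 (out_cols : List String) (extra_cols : List String) : List String :=
  let base := out_cols
  let extras := extra_cols.filter (fun c => c != "" && PySem.Str.strip c != "")
  if extras = [] then base
  else
    let base_no_extras := base.filter (fun c => !(extras.contains c))
    match PySem.List.index? base_no_extras "Symptom 20" with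
    | some idx =>
        PySem.List.slice base_no_extras none (some ((idx : Int) + 1)) ++ extras ++
        PySem.List.slice base_no_extras (some ((idx : Int) + 1)) none
    | none => base_no_extras ++ extras

-- ===== PORT B =====
def insert_after_symptom20_alt (out_cols : List String) (extra_cols : List String) : List String :=
  let extras := extra_cols.filter (fun c => c != "" && PySem.Str.strip c != "")
  let extrasSet : PySem.Set String := PySem.Set.ofList extras
  let st := out_cols.foldl (fun (st : List String × Bool) c =>
    if PySem.Set.contains extrasSet c then st
    else
      let r := st.1 ++ [c]
      if !st.2 && c == "Symptom 20" then (r ++ extras, true) else (r, st.2)) ([], false)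
  if !st.2 then st.1 ++ extras else st.1

-- ===== PRECONDITION & SPEC =====
def Spec_insert_after_symptom20 (out_cols : List String) (extra_cols : List String) (out : List String) : Prop := out = insert_after_symptom20_alt out_cols extra_cols
instance (out_cols : List String) (extra_cols : List String) (out : List String) : Decidable (Spec_insert_after_symptom20 out_cols extra_cols out) := by unfold Spec_insert_after_symptom20; infer_instance

-- ===== CLAIM (what is proved, stated in full; the proofs are below) =====
def Claim_equal_insert_after_symptom20 : Prop := ∀ (out_cols : List String) (extra_cols : List String), Dom_insert_after_symptom20 out_cols extra_cols → Spec_insert_after_symptom20 out_cols extra_cols (insert_after_symptom20 out_cols extra_cols)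

-- ===== LEMMAS AND PROOFS =====

/-- Proof-side characterisation: splice `extras` after the first "Symptom 20", else at the end. -/
def ins1 (extras : List String) : List String → List String
  | [] => extras
  | c :: rest => if c = "Symptom 20" then c :: (extras ++ rest) else c :: ins1 extras rest

theorem ins1_nil (l : List String) : ins1 [] l = l := by
  induction l with
  | nil => rfl
  | cons c rest ih => by_cases h : c = "Symptom 20" <;> simp [ins1, h, ih]

/-- A's index/slice branch computes `ins1 extras l`. -/
theorem a_branch_eq_ins1 (extras l : List String) :
    (match PySem.List.index? l "Symptom 20" with
      | some idx =>
          PySem.List.slice l none (some ((idx : Int) + 1)) ++ extras ++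
          PySem.List.slice l (some ((idx : Int) + 1)) none
      | none => l ++ extras) = ins1 extras l := by
  induction l with
  | nil => rw [(PySem.List.index?_eq_none_iff [] "Symptom 20").mpr (by simp)]; simp [ins1]
  | cons c rest ih =>
    by_cases h : c = "Symptom 20"
    · subst h
      rw [PySem.List.index?_cons_self]
      have h1 : ((0 : Nat) : Int) + 1 = ((1 : Nat) : Int) := by norm_num
      simp only [h1, PySem.List.slice_to_natCast, PySem.List.slice_from_natCast, ins1]
      simp
    · rw [PySem.List.index?_cons_of_ne rest h]
      cases hk : PySem.List.index? rest "Symptom 20" with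
      | none =>
        rw [hk] at ih
        simp only [Option.map_none, ins1, if_neg h]
        simp [← ih]
      | some k =>
        rw [hk] at ih
        have h2 : ∀ m : Nat, ((m : Int) + 1) = ((m + 1 : Nat) : Int) := by intro m; push_cast; ring
        simp only [Option.map_some, h2, PySem.List.slice_to_natCast, PySem.List.slice_from_natCast,
          ins1, if_neg h] at ih ⊢
        simp only [List.take_succ_cons, List.drop_succ_cons, List.cons_append]
        rw [← ih]

/-- The body of B's loop, with the set-membership test rewritten to list membership. -/
def stepF (extras : List String) (st : List String × Bool) (c : String) : List String × Bool :=
  if extras.contains c then st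
  else
    let r := st.1 ++ [c]
    if !st.2 && c == "Symptom 20" then (r ++ extras, true) else (r, st.2)

theorem stepF_eq (extras : List String) :
    (fun (st : List String × Bool) (c : String) =>
      if PySem.Set.contains (PySem.Set.ofList extras) c then st
      else
        let r := st.1 ++ [c]
        if !st.2 && c == "Symptom 20" then (r ++ extras, true) else (r, st.2))
    = stepF extras := by
  funext st c
  simp only [stepF, PySem.Set.contains_eq_listContains, List.contains_eq_mem,
    PySem.Set.mem_ofList]

/-- Once the flag is set, B's loop just appends the surviving columns. -/
theorem loopB_true (extras xs acc : List String) :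
    xs.foldl (stepF extras) (acc, true)
    = (acc ++ xs.filter (fun c => !(extras.contains c)), true) := by
  induction xs generalizing acc with
  | nil => simp
  | cons c rest ih =>
    by_cases hm : c ∈ extras
    · rw [List.foldl_cons,
        show stepF extras (acc, true) c = (acc, true) from by unfold stepF; simp [hm], ih]
      simp [hm]
    · rw [List.foldl_cons,
        show stepF extras (acc, true) c = (acc ++ [c], true) from by unfold stepF; simp [hm], ih]
      simp [hm]

/-- B's loop from the unset flag, plus the final append, computes `ins1`. -/
theorem loopB_false (extras xs acc : List String) :
    (if !(xs.foldl (stepF extras) (acc, false)).2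
      then (xs.foldl (stepF extras) (acc, false)).1 ++ extras
      else (xs.foldl (stepF extras) (acc, false)).1)
    = acc ++ ins1 extras (xs.filter (fun c => !(extras.contains c))) := by
  induction xs generalizing acc with
  | nil => simp [ins1]
  | cons c rest ih =>
    by_cases hm : c ∈ extras
    · rw [List.foldl_cons,
        show stepF extras (acc, false) c = (acc, false) from by unfold stepF; simp [hm], ih]
      simp [hm]
    · by_cases hs : c = "Symptom 20"
      · subst hs
        rw [List.foldl_cons,
          show stepF extras (acc, false) "Symptom 20"
              = (acc ++ ["Symptom 20"] ++ extras, true) from by unfold stepF; simp [hm],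
          loopB_true]
        simp [ins1, hm]
      · rw [List.foldl_cons,
          show stepF extras (acc, false) c = (acc ++ [c], false) from by
            unfold stepF; simp [hm, hs], ih]
        simp [ins1, hm, hs]

-- ===== VERDICT (by name: the statement is the Claim_ definition above) =====
theorem insert_after_symptom20_spec : Claim_equal_insert_after_symptom20 := by
  intro out_cols extra_cols _
  show insert_after_symptom20 out_cols extra_cols = insert_after_symptom20_alt out_cols extra_cols
  unfold insert_after_symptom20 insert_after_symptom20_alt
  dsimp only
  rw [stepF_eq, loopB_false]
  by_cases he : (extra_cols.filter (fun c => c != "" && PySem.Str.strip c != "")) = []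
  · simp [he, ins1_nil]
  · rw [if_neg he, a_branch_eq_ins1]
    simp
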